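-- pv_equiv track=rewrite | github.com/Anpoe/visualisation-of-data-points-using-sankey-diagram | programming exam/ascending_order.py | ascending_order_multi
-- ===== SOURCE A (Python) =====
-- def ascending_order_multi(citizen_cases):
--     """Remove out of order updates out of a list of lists of updates
--
--        Args:
--             citizen_cases (list): List of citizens cases, each of them containing a nested list with the citizen's updates
--
--        return:
--             citizen_cases (list): List of citizens cases, sorted and delete unnecessary numbers,
--             each of them containing a nested list with the citizen's updates
--     """
--     # Insert your code here
--
--     # for loop to travel throughout the list in the lists
--     for n in citizen_cases:
--         # set counter as a stop determinate
--         counter = 1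
--         # for loop to travel throughout the number in lists
--         for i in n:
--
--             while counter < len(n):
--                 # If the number after is smaller than the one before, delete it
--                 if n[counter] < n[counter - 1]:
--                     del n[counter]
--                 else:
--                     counter += 1
--     return citizen_cases
-- ===== SOURCE B (Python) =====
-- def ascending_order_multi(citizen_cases):
--     """Single pass per list: keep an element only if it is >= the last kept one.
--     Returns fresh lists (does not mutate the input in place, unlike the original)."""
--     result = []
--     for n in citizen_cases:
--         kept = []
--         for x in n:
--             if not kept or x >= kept[-1]:
--                 kept.append(x)
--         result.append(kept)
--     return result
-- ===== Notes on version B (the rewrite author's own statement) =====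
-- stated objective: alternative
-- what changed: Replaces A's repeated in-place del scan (worst-case quadratic per list) with a single left-to-right pass that appends an element only when it is >= the last kept element; intended as faster but measured only 1.4x at the largest size, so no speed is claimed; return-value equivalence only (A mutates its argument in place, B builds fresh lists).
import Mathlib
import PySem

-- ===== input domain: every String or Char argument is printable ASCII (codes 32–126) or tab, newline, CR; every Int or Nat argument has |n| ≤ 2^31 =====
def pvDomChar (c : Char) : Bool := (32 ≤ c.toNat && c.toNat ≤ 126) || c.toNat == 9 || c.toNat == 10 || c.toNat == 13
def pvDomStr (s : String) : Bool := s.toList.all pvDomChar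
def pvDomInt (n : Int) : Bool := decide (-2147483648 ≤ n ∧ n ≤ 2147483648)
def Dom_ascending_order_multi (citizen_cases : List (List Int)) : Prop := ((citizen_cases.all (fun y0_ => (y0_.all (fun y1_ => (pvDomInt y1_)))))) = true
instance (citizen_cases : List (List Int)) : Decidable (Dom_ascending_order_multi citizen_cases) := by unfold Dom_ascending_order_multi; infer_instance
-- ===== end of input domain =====

-- B replaces A's repeated in-place deletion scan with a single left-to-right pass keeping
-- elements >= the last kept one (a different algorithm; no speed claim); equivalence is about
-- the RETURN value only: Python A mutates its argument in place, B builds fresh lists.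


-- ===== PORT A =====
-- the inner 'while counter < len(n): if n[counter] < n[counter-1]: del n[counter] else: counter += 1'
-- fuel is only a totality guard: each iteration decreases len(n) - counter, so fuel = len(n)
-- at the call site is always enough (all reachable calls have counter ≥ 1, indices in range)
def pyWhileA : Nat → List Int → Nat → List Int × Nat
  | 0, n, counter => (n, counter)
  | fuel + 1, n, counter =>
      if counter < n.length then
        if n.getD counter 0 < n.getD (counter - 1) 0 then
          pyWhileA fuel (n.eraseIdx counter) counter
        else
          pyWhileA fuel n (counter + 1)
      else (n, counter)

-- 'for i in n' over the list being mutated: Python advances an index k while k < len(n);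
-- fuel = initial len(n) bounds the iteration count (len never grows)
def pyForA : Nat → List Int → Nat → Nat → List Int
  | 0, n, _, _ => n
  | fuel + 1, n, counter, k =>
      if k < n.length then
        let r := pyWhileA n.length n counter
        pyForA fuel r.1 r.2 (k + 1)
      else n

def ascending_order_multi (citizen_cases : List (List Int)) : List (List Int) :=
  citizen_cases.map (fun n => pyForA n.length n 1 0)

-- ===== PORT B =====
-- single pass: append x only if kept is empty or x >= the last kept element
def keepB (last : Int) : List Int → List Int
  | [] => []
  | x :: xs => if x < last then keepB last xs else x :: keepB x xs

def ascendB : List Int → List Int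
  | [] => []
  | x :: xs => x :: keepB x xs

def ascending_order_multi_alt (citizen_cases : List (List Int)) : List (List Int) :=
  citizen_cases.map ascendB

-- ===== PRECONDITION & SPEC =====
def Spec_ascending_order_multi (citizen_cases : List (List Int)) (out : List (List Int)) : Prop := out = ascending_order_multi_alt citizen_cases
instance (citizen_cases : List (List Int)) (out : List (List Int)) : Decidable (Spec_ascending_order_multi citizen_cases out) := by unfold Spec_ascending_order_multi; infer_instance

-- ===== CLAIM (what is proved, stated in full; the proofs are below) =====
def Claim_equal_ascending_order_multi : Prop := ∀ (citizen_cases : List (List Int)), Dom_ascending_order_multi citizen_cases → Spec_ascending_order_multi citizen_cases (ascending_order_multi citizen_cases)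

-- ===== LEMMAS AND PROOFS =====

-- invariant of the while loop: the processed prefix p (ending in `last`) is final, the
-- remainder is filtered exactly like keepB, and the final counter equals the final length;
-- one fuel unit is consumed per remaining element
theorem pyWhileA_inv (rest : List Int) : ∀ (fuel : Nat) (p : List Int) (last : Int),
    rest.length ≤ fuel →
    pyWhileA fuel (p ++ last :: rest) (p.length + 1)
      = (p ++ last :: keepB last rest, (p ++ last :: keepB last rest).length) := by
  induction rest with
  | nil =>
      intro fuel p last _
      cases fuel with
      | zero => simp [pyWhileA, keepB]
      | succ f => simp [pyWhileA, keepB]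
  | cons y ys ih =>
      intro fuel p last hf
      obtain ⟨f, rfl⟩ : ∃ f, fuel = f + 1 := ⟨fuel - 1, by simp at hf; omega⟩
      have hfy : ys.length ≤ f := by simp at hf; omega
      rw [pyWhileA]
      have hlen : p.length + 1 < (p ++ last :: y :: ys).length := by simp
      have hg1 : (p ++ last :: y :: ys).getD (p.length + 1) 0 = y := by
        simp [List.getD]
      have hg0 : (p ++ last :: y :: ys).getD (p.length + 1 - 1) 0 = last := by
        simp [List.getD]
      rw [if_pos hlen, hg1, hg0]
      by_cases hc : y < last
      · rw [if_pos hc]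
        have he : (p ++ last :: y :: ys).eraseIdx (p.length + 1) = p ++ last :: ys := by
          rw [show p ++ last :: y :: ys = (p ++ [last]) ++ y :: ys by simp,
              show p.length + 1 = (p ++ [last]).length by simp,
              List.eraseIdx_append_of_length_le (le_refl _)]
          simp
        rw [he, ih f p last hfy]
        simp [keepB, hc]
      · rw [if_neg hc]
        have h1 : p ++ last :: y :: ys = (p ++ [last]) ++ y :: ys := by simp
        have h2 : p.length + 1 + 1 = (p ++ [last]).length + 1 := by simp
        rw [h1, h2, ih f (p ++ [last]) y hfy]
        simp [keepB, hc]

-- the while loop is a no-op once counter ≥ len(n)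
theorem pyWhileA_done (fuel : Nat) (n : List Int) (c : Nat) (hc : n.length ≤ c) :
    pyWhileA fuel n c = (n, c) := by
  cases fuel with
  | zero => rfl
  | succ f => rw [pyWhileA, if_neg (by omega)]

-- once counter ≥ len(n), the remaining for-iterations change nothing
theorem pyForA_done (fuel : Nat) : ∀ (n : List Int) (c k : Nat), n.length ≤ c →
    pyForA fuel n c k = n := by
  induction fuel with
  | zero => intro n c k _; rfl
  | succ f ih =>
      intro n c k hc
      rw [pyForA]
      split
      · rw [pyWhileA_done n.length n c hc]
        exact ih n c (k + 1) hc
      · rfl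

theorem pyForA_eq (n : List Int) : pyForA n.length n 1 0 = ascendB n := by
  cases n with
  | nil => rfl
  | cons x xs =>
      rw [List.length_cons, pyForA]
      have hw := pyWhileA_inv xs (x :: xs).length [] x (by simp)
      simp only [List.nil_append, List.length_nil, Nat.zero_add] at hw
      rw [if_pos (by simp), hw]
      exact pyForA_done xs.length _ _ 1 (le_refl _)

-- ===== VERDICT (by name: the statement is the Claim_ definition above) =====
theorem ascending_order_multi_spec : Claim_equal_ascending_order_multi := by
  intro cc _
  unfold Spec_ascending_order_multi ascending_order_multi ascending_order_multi_alt
  exact List.map_congr_left (fun n _ => pyForA_eq n)
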